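-- pv_equiv track=rewrite | github.com/NASA-JPL-Teamtools-Studio/tts_dtat | src/tts_dtat/datainterpolator.py | make_num_vals_from_strings
-- ===== SOURCE A (Python) =====
-- def make_num_vals_from_strings(col):
--     """Make a new column of non-empty numeric types from a column of string values.
--     :keyword col: column of string values"""
--     lookup = {}
--     int_state_data = []
--     i = 0
--     for item in col:
--         if item not in lookup.keys():
--             lookup[item] = len(lookup)
--         int_state_data.insert(i, lookup[item])
--         i += 1
--     return int_state_data
-- ===== SOURCE B (Python) =====
-- def make_num_vals_from_strings(col):
--     """Make a new column of non-empty numeric types from a column of string values.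
--     :keyword col: column of string values"""
--     col = list(col)
--     first = [col.index(x) for x in col]   # first-occurrence position of each element
--     # pref[k] = number of first-occurrence positions strictly before k
--     pref = []
--     c = 0
--     for k in range(len(col)):
--         pref.append(c)
--         if first[k] == k:
--             c += 1
--     # code of an element = number of first occurrences strictly before its own first occurrence
--     return [pref[f] for f in first]
-- ===== Notes on version B (the rewrite author's own statement) =====
-- stated objective: alternative
-- what changed: A's hash-table encoder (grow a dict of codes while emitting) is replaced by a dict-free positional computation: compute each element's first-occurrence position with list.index, count first-occurrence positions with a running prefix counter, and read each code off as the number of first occurrences strictly before the element's own first occurrence; trades A's O(n) dict for O(n^2) index arithmetic with no auxiliary mapping structure.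
import Mathlib
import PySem

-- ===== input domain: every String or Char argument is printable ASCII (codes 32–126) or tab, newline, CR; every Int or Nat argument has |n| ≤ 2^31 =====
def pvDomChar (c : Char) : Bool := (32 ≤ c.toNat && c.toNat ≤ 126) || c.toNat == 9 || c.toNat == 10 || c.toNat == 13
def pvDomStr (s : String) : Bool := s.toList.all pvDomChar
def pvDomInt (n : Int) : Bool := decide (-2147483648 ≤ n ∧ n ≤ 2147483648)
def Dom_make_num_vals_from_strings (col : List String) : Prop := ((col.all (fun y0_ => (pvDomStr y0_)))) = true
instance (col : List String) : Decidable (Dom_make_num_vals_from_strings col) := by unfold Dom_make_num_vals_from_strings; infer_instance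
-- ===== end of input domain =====

-- B drops A's dict entirely: it computes each element's first-occurrence position with list.index
-- and its code as the count of first-occurrence positions strictly before it; objective: alternative.

-- ===== PORT A =====
-- one loop iteration of A: maybe-extend the lookup dict, append lookup[item], bump i
-- (lookup[item] is always present after the branch, so the KeyError case of get? is dead; .getD 0 marks it)
def pvAStep (st : PySem.Dict String Int × List Int × Int) (item : String) :
    PySem.Dict String Int × List Int × Int :=
  let lookup := if item ∉ st.1.keys then st.1.insert item ((PySem.Dict.size st.1 : Int)) else st.1
  (lookup, PySem.List.insert st.2.1 st.2.2 ((lookup.get? item).getD 0), st.2.2 + 1)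

def make_num_vals_from_strings (col : List String) : List Int :=
  (col.foldl pvAStep (PySem.Dict.empty, [], 0)).2.1

-- ===== PORT B =====
-- col.index(x) never raises here (x ∈ col), so index? is always some; .getD 0 marks the dead case
def make_num_vals_from_strings_alt (col : List String) : List Int :=
  let first : List Int := col.map (fun x => (((PySem.List.index? col x).getD 0 : Nat) : Int))
  let pc := (PySem.List.pyRange 0 (PySem.List.len col) 1).foldl
      (fun (st : List Int × Int) k =>
        (st.1 ++ [st.2], if (PySem.List.pyGet? first k).getD 0 = k then st.2 + 1 else st.2))
      (([] : List Int), (0 : Int))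
  first.map (fun f => (PySem.List.pyGet? pc.1 f).getD 0)

-- ===== PRECONDITION & SPEC =====
def Spec_make_num_vals_from_strings (col : List String) (out : List Int) : Prop := out = make_num_vals_from_strings_alt col
instance (col : List String) (out : List Int) : Decidable (Spec_make_num_vals_from_strings col out) := by unfold Spec_make_num_vals_from_strings; infer_instance

-- ===== CLAIM (what is proved, stated in full; the proofs are below) =====
def Claim_equal_make_num_vals_from_strings : Prop := ∀ (col : List String), Dom_make_num_vals_from_strings col → Spec_make_num_vals_from_strings col (make_num_vals_from_strings col)

-- ===== LEMMAS AND PROOFS =====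

-- Invariant of A's loop after processing a prefix p: the dict maps each seen value to its
-- first-occurrence index in dedup p, the emitted list is the dedup-index map over p, and i = len(p).
theorem pvA_fold_inv (p : List String) :
    ∃ d : PySem.Dict String Int,
      p.foldl pvAStep (PySem.Dict.empty, [], 0) =
        (d, p.map (fun x => ((PySem.List.index? (PySem.List.dedup p) x).getD 0 : Int)), (p.length : Int)) ∧
      d.keys = PySem.List.dedup p ∧
      d.size = (PySem.List.dedup p).length ∧
      (∀ x, d.get? x = (PySem.List.index? (PySem.List.dedup p) x).map (fun k => (k : Int))) := by
  induction p using List.reverseRecOn with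
  | nil =>
      refine ⟨PySem.Dict.empty, ?_, ?_, ?_, ?_⟩ <;>
        simp [PySem.List.dedup, PySem.Dict.get?_empty, PySem.List.index?]
  | append_singleton p a ih =>
      obtain ⟨d, hfold, hkeys, hsize, hget⟩ := ih
      rw [List.foldl_append, hfold]
      by_cases hmem : a ∈ p
      · have hded : PySem.List.dedup (p ++ [a]) = PySem.List.dedup p := by
          simp only [PySem.List.dedup_eq_ofList, PySem.Set.ofList_append_singleton]
          exact PySem.Set.add_of_mem (by exact (PySem.List.mem_dedup p a).2 hmem)
        have hcont : a ∈ d.keys := by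
          rw [hkeys, PySem.List.mem_dedup]; exact hmem
        refine ⟨d, ?_, by rw [hded]; exact hkeys, by rw [hded]; exact hsize, by rw [hded]; exact hget⟩
        simp only [List.foldl_cons, List.foldl_nil, pvAStep, if_neg (not_not_intro hcont)]
        have hlen : (p.length : Int) = PySem.List.len (p.map (fun x => ((PySem.List.index? (PySem.List.dedup p) x).getD 0 : Int))) := by
          simp [PySem.List.len]
        rw [hlen, PySem.List.insert_len]
        simp only [hded, List.map_append, List.map_cons, List.map_nil, hget a, Prod.mk.injEq]
        refine ⟨trivial, ?_, ?_⟩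
        · congr 1
          cases PySem.List.index? (PySem.List.dedup p) a <;> simp
        · rw [← hlen]; simp
      · have hamd : a ∉ PySem.List.dedup p := by rw [PySem.List.mem_dedup]; exact hmem
        have hded : PySem.List.dedup (p ++ [a]) = PySem.List.dedup p ++ [a] := by
          simp only [PySem.List.dedup_eq_ofList, PySem.Set.ofList_append_singleton]
          exact PySem.Set.add_of_not_mem (by simpa [PySem.List.dedup_eq_ofList] using hamd)
        have hcont : a ∉ d.keys := by rw [hkeys, PySem.List.mem_dedup]; exact hmem
        have hcontF : d.contains a = false := by
          rw [← Bool.not_eq_true, PySem.Dict.contains_iff_mem_keys]; exact hcont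
        refine ⟨d.insert a (d.size : Int), ?_, ?_, ?_, ?_⟩
        · simp only [List.foldl_cons, List.foldl_nil, pvAStep, if_pos hcont]
          have hlen : (p.length : Int) = PySem.List.len (p.map (fun x => ((PySem.List.index? (PySem.List.dedup p) x).getD 0 : Int))) := by
            simp [PySem.List.len]
          rw [hlen, PySem.List.insert_len]
          simp only [Prod.mk.injEq]
          refine ⟨trivial, ?_, by rw [← hlen]; simp⟩
          rw [hded, List.map_append]
          congr 1
          · apply List.map_congr_left
            intro x hx
            rw [PySem.List.index?_append_of_mem _ ((PySem.List.mem_dedup p x).2 hx)]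
          · simp only [List.map_cons, List.map_nil]
            rw [PySem.Dict.get?_insert_self, PySem.List.index?_append_singleton_self _ a hamd]
            simp [hsize]
        · rw [hded, PySem.Dict.keys_insert_of_not_contains _ _ hcontF, hkeys]
        · rw [hded, PySem.Dict.size_insert, if_neg (by simp [hcontF]), hsize]
          simp
        · intro x
          rw [hded, PySem.Dict.get?_insert]
          by_cases hx : x = a
          · subst hx
            rw [if_pos rfl, PySem.List.index?_append_singleton_self _ x hamd]
            simp [hsize]
          · rw [if_neg hx, hget x]
            by_cases hxd : x ∈ PySem.List.dedup p
            · rw [PySem.List.index?_append_of_mem _ hxd]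
            · rw [(PySem.List.index?_eq_none_iff _ _).2 hxd,
                  (PySem.List.index?_eq_none_iff _ _).2 (by
                    simp only [List.mem_append, List.mem_singleton]
                    rintro (h | h)
                    exacts [hxd h, hx h])]

-- First-occurrence position j of x in l ⇒ x's dedup index is the number of distinct values before j
theorem pv_index_dedup (l : List String) (x : String) (j : Nat)
    (hj : PySem.List.index? l x = some j) :
    PySem.List.index? (PySem.List.dedup l) x = some (PySem.List.dedup (l.take j)).length := by
  induction l using List.reverseRecOn generalizing j with
  | nil => simp [PySem.List.index?] at hj
  | append_singleton l a ih =>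
      by_cases hx : x ∈ l
      · have hj' : PySem.List.index? l x = some j := by
          rw [PySem.List.index?_append_of_mem _ hx] at hj; exact hj
        have hjlt : j < l.length := by
          obtain ⟨pre, suf, hcol, hlen, -⟩ := (PySem.List.index?_eq_some_iff _ _ _).1 hj'
          subst hcol; simp [← hlen]
        have htake : (l ++ [a]).take j = l.take j := by
          rw [List.take_append_of_le_length (le_of_lt hjlt)]
        rw [htake]
        by_cases hmem : a ∈ l
        · have hded : PySem.List.dedup (l ++ [a]) = PySem.List.dedup l := by
            simp only [PySem.List.dedup_eq_ofList, PySem.Set.ofList_append_singleton]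
            exact PySem.Set.add_of_mem (by exact (PySem.List.mem_dedup l a).2 hmem)
          rw [hded]; exact ih j hj'
        · have hded : PySem.List.dedup (l ++ [a]) = PySem.List.dedup l ++ [a] := by
            simp only [PySem.List.dedup_eq_ofList, PySem.Set.ofList_append_singleton]
            exact PySem.Set.add_of_not_mem (by
              simpa [PySem.List.dedup_eq_ofList] using (fun h => hmem ((PySem.List.mem_dedup l a).1 h)))
          rw [hded, PySem.List.index?_append_of_mem _ ((PySem.List.mem_dedup l x).2 hx)]
          exact ih j hj'
      · have hxa : x = a := by
          have : x ∈ l ++ [a] := (PySem.List.index?_isSome_iff _ _).1 (by rw [hj]; rfl)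
          simp only [List.mem_append, List.mem_singleton] at this
          exact this.resolve_left hx
        subst hxa
        rw [PySem.List.index?_append_singleton_self _ _ hx] at hj
        have hjl : j = l.length := by injection hj with h; omega
        subst hjl
        have hxd : x ∉ PySem.List.dedup l := fun h => hx ((PySem.List.mem_dedup l x).1 h)
        have hded : PySem.List.dedup (l ++ [x]) = PySem.List.dedup l ++ [x] := by
          simp only [PySem.List.dedup_eq_ofList, PySem.Set.ofList_append_singleton]
          exact PySem.Set.add_of_not_mem (by simpa [PySem.List.dedup_eq_ofList] using hxd)
        rw [hded, PySem.List.index?_append_singleton_self _ _ hxd,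
            List.take_append_of_le_length le_rfl, List.take_length]

-- first[k] = k  ↔  position k is a first occurrence
theorem pv_first_cond (col : List String) (k : Nat) (hk : k < col.length) :
    ((PySem.List.pyGet? (col.map (fun x => (((PySem.List.index? col x).getD 0 : Nat) : Int))) (k : Int)).getD 0 = (k : Int))
      ↔ col[k] ∉ col.take k := by
  rw [PySem.List.pyGet?_natCast]
  rw [List.getElem?_map]
  rw [List.getElem?_eq_getElem hk]
  simp only [Option.map_some, Option.getD_some, Nat.cast_inj]
  obtain ⟨m, hm⟩ := Option.isSome_iff_exists.mp ((PySem.List.index?_isSome_iff col col[k]).2 (List.getElem_mem hk))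
  obtain ⟨hmlt, hgm, hmin⟩ := PySem.List.getElem_of_index?_eq_some hm
  have hmle : m ≤ k := by
    by_contra h
    exact hmin k (by omega) rfl
  rw [hm, Option.getD_some]
  constructor
  · intro hmk hmem
    rw [List.mem_take_iff_getElem] at hmem
    obtain ⟨i, hilt, hieq⟩ := hmem
    subst hmk
    exact hmin i (by omega) hieq
  · intro hnot
    by_contra hne
    have hmk : m < k := lt_of_le_of_ne hmle hne
    apply hnot
    rw [List.mem_take_iff_getElem]
    exact ⟨m, by omega, hgm⟩

-- Invariant of B's prefix-count loop over range(j): pref lists the running distinct counts,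
-- c is the number of distinct values in the first j elements
theorem pv_pref_inv (col : List String) (j : Nat) (hj : j ≤ col.length) :
    (PySem.List.pyRange 0 (j : Int) 1).foldl
      (fun (st : List Int × Int) k =>
        (st.1 ++ [st.2], if (PySem.List.pyGet? (col.map (fun x => (((PySem.List.index? col x).getD 0 : Nat) : Int))) k).getD 0 = k then st.2 + 1 else st.2))
      (([] : List Int), (0 : Int))
      = ((List.range j).map (fun i => ((PySem.List.dedup (col.take i)).length : Int)),
         ((PySem.List.dedup (col.take j)).length : Int)) := by
  induction j with
  | zero => simp [PySem.List.pyRange_one_eq_nil, PySem.List.dedup]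
  | succ j ih =>
      have hjlt : j < col.length := by omega
      have hcast : ((j + 1 : Nat) : Int) = (j : Int) + 1 := by push_cast; ring
      rw [hcast, PySem.List.pyRange_one_succ_right (by positivity), List.foldl_append,
          ih (by omega)]
      simp only [List.foldl_cons, List.foldl_nil]
      have htake : col.take (j + 1) = col.take j ++ [col[j]] := by
        rw [List.take_add_one, List.getElem?_eq_getElem hjlt]; rfl
      rw [htake, List.range_succ, List.map_append, List.map_cons, List.map_nil]
      by_cases hmem : col[j] ∈ col.take j
      · have hded : PySem.List.dedup (col.take j ++ [col[j]]) = PySem.List.dedup (col.take j) := by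
          simp only [PySem.List.dedup_eq_ofList, PySem.Set.ofList_append_singleton]
          exact PySem.Set.add_of_mem (by exact (PySem.List.mem_dedup _ _).2 hmem)
        rw [hded, if_neg (by rw [pv_first_cond col j hjlt]; exact fun h => (h hmem).elim)]
      · have hxd : col[j] ∉ PySem.List.dedup (col.take j) :=
          fun h => hmem ((PySem.List.mem_dedup _ _).1 h)
        have hded : PySem.List.dedup (col.take j ++ [col[j]]) = PySem.List.dedup (col.take j) ++ [col[j]] := by
          simp only [PySem.List.dedup_eq_ofList, PySem.Set.ofList_append_singleton]
          exact PySem.Set.add_of_not_mem (by simpa [PySem.List.dedup_eq_ofList] using hxd)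
        rw [hded, if_pos ((pv_first_cond col j hjlt).2 hmem)]
        simp

-- ===== VERDICT (by name: the statement is the Claim_ definition above) =====
theorem make_num_vals_from_strings_spec : Claim_equal_make_num_vals_from_strings := by
  intro col _
  obtain ⟨d, hfold, -, -, -⟩ := pvA_fold_inv col
  unfold Spec_make_num_vals_from_strings
  simp only [make_num_vals_from_strings, make_num_vals_from_strings_alt]
  rw [hfold]
  have hpc : PySem.List.len col = ((col.length : Nat) : Int) := by simp [PySem.List.len]
  rw [hpc, pv_pref_inv col col.length le_rfl]
  simp only [List.map_map]
  apply List.map_congr_left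
  intro x hx
  obtain ⟨j, hj⟩ := Option.isSome_iff_exists.mp ((PySem.List.index?_isSome_iff col x).2 hx)
  have hjlt : j < col.length := by
    obtain ⟨pre, suf, hcol, hlen, -⟩ := (PySem.List.index?_eq_some_iff _ _ _).1 hj
    subst hcol; simp [← hlen]
  simp only [Function.comp, hj, Option.getD_some]
  rw [PySem.List.pyGet?_natCast, List.getElem?_map,
      List.getElem?_eq_getElem (by simpa using hjlt), List.getElem_range]
  simp only [Option.map_some, Option.getD_some]
  rw [pv_index_dedup col x j hj]
  simp
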